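-- pv_equiv track=rewrite | github.com/pypi-data/pypi-mirror-311 | packages/qichang-webagent/qichang_webagent-0.1.4-py3-none-any.whl/qichang_webagent/core/extractors.py | simplify_xpath_dict
-- ===== SOURCE A (Python) =====
-- from typing import Any, Dict
-- from typing import List, Dict
-- from collections import defaultdict
--
-- def simplify_xpath_dict(xpath_dict: Dict[str, str]) -> Dict[str, str]:
--     """
--     Simplifies a dictionary by removing longer keys that have another key as prefix
--     when they share the same value.
--
--     Args:
--         xpath_dict (Dict[str, str]): Dictionary mapping XPath to text content
--
--     Returns:
--         Dict[str, str]: Simplified dictionary with redundant keys removed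
--
--     Example:
--         Input: {
--             "/html/div": "text",
--             "/html/div/span": "text",
--             "/form": "submit",
--             "/form/button": "submit",
--             "/form/div/button": "submit"
--         }
--         Output: {
--             "/html/div": "text",
--             "/form": "submit"
--         }
--     """
--     # Group keys by their values
--     value_to_keys = defaultdict(list)
--     for key, value in xpath_dict.items():
--         value_to_keys[value].append(key)
--
--     # Process each group of keys with the same value
--     keys_to_keep = set()
--     for value, keys in value_to_keys.items():
--         # Sort keys by length to process shorter keys first
--         keys.sort(key=len)
--
--         # For each key, check if it's a prefix of any remaining keys
--         for i, current_key in enumerate(keys):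
--             # If this key is already marked for removal, skip it
--             if current_key not in keys_to_keep:
--                 # Check if this key is a prefix of any other keys
--                 is_prefix_of_others = False
--                 for longer_key in keys[i + 1:]:
--                     if longer_key.startswith(current_key):
--                         is_prefix_of_others = True
--                         break
--
--                 if is_prefix_of_others:
--                     keys_to_keep.add(current_key)
--                 elif i == 0:  # Always keep at least one key per value
--                     keys_to_keep.add(current_key)
--
--     # Create new dictionary with only the kept keys
--     simplified_dict = {k: xpath_dict[k] for k in sorted(keys_to_keep)}
--     return simplified_dict
-- ===== SOURCE B (Python) =====
-- def simplify_xpath_dict(xpath_dict):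
--     # Group keys by value, then find prefix keys by one lexicographic sort per
--     # group: a key has a proper extension in its group iff its immediate
--     # lexicographic successor starts with it.  Also keep the first shortest
--     # key of each group (Python's stable min), as the original does.
--     groups = {}
--     for key, value in xpath_dict.items():
--         groups.setdefault(value, []).append(key)
--     keep = []
--     for ks in groups.values():
--         s = sorted(ks)
--         pref = [k for k, nxt in zip(s, s[1:]) if nxt.startswith(k)]
--         shortest = min(ks, key=len)
--         if shortest not in pref:
--             pref.append(shortest)
--         keep += pref
--     return {k: xpath_dict[k] for k in sorted(keep)}
-- ===== Notes on version B (the rewrite author's own statement) =====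
-- stated objective: faster
-- what changed: A tests every key of a value group against all longer keys of the group (quadratic scans after a length sort); B sorts each value group lexicographically once and marks a key as a prefix key iff its immediate lexicographic successor starts with it, adding the group's stable shortest key separately.
import Mathlib
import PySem

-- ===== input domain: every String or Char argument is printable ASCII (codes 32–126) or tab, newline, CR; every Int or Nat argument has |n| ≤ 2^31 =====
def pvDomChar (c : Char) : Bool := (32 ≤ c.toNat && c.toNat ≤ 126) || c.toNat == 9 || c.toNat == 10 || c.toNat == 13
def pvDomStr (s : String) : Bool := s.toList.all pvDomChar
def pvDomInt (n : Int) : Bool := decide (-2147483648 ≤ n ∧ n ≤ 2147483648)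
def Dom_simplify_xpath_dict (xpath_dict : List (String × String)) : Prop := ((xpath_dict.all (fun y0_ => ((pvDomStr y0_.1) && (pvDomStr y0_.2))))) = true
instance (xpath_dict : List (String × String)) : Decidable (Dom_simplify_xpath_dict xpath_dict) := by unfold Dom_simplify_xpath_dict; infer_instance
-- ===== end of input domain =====

-- B replaces A's per-key scan over all longer keys of a value group by one
-- lexicographic sort per group (a key has a proper extension in its group iff
-- its immediate lexicographic successor starts with it); objective: faster.

-- ===== PORT A =====
-- literal transliteration of A; the dict argument is modelled by
-- PySem.Dict.ofList (duplicate keys in the list collapse as in a Python dict),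
-- xpath_dict[k] on the always-present kept key k is ported as getD k "".
def simplify_xpath_dict (xpath_dict : List (String × String)) : List (String × String) :=
  let d := PySem.Dict.ofList xpath_dict
  -- value_to_keys = defaultdict(list); for key, value in ...items(): value_to_keys[value].append(key)
  let value_to_keys :=
    d.items.foldl (fun acc kv => acc.modify kv.2 [] (fun l => l ++ [kv.1])) PySem.Dict.empty
  -- keys_to_keep = set(); for value, keys in value_to_keys.items(): ...
  let keys_to_keep : PySem.Set String :=
    value_to_keys.items.foldl (fun keep vks =>
      -- keys.sort(key=len)
      let keys := PySem.List.sorted vks.2 (fun k => PySem.Str.len k)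
      -- for i, current_key in enumerate(keys): ...
      (PySem.List.enumerate keys 0).foldl (fun keep ick =>
        if !(PySem.Set.contains keep ick.2) then
          -- any(...) with break = List.any over keys[i+1:]
          let is_prefix_of_others :=
            (PySem.List.slice keys (some (ick.1 + 1)) none).any
              (fun longer_key => PySem.Str.startswith longer_key ick.2)
          if is_prefix_of_others then PySem.Set.add keep ick.2
          else if ick.1 = 0 then PySem.Set.add keep ick.2
          else keep
        else keep) keep) PySem.Set.empty
  -- {k: xpath_dict[k] for k in sorted(keys_to_keep)}
  (PySem.List.sorted keys_to_keep (fun k => k)).map (fun k => (k, d.getD k ""))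

-- ===== PORT B =====
-- literal transliteration of Source B (same dict modelling as port A;
-- min(ks, key=len) on the never-empty group is PySem.List.min?, the none
-- branch is Python's unreachable ValueError case)
def simplify_xpath_dict_alt (xpath_dict : List (String × String)) : List (String × String) :=
  let d := PySem.Dict.ofList xpath_dict
  -- groups = {}; for key, value in ...items(): groups.setdefault(value, []).append(key)
  let groups :=
    d.items.foldl (fun acc kv => acc.modify kv.2 [] (fun l => l ++ [kv.1])) PySem.Dict.empty
  -- keep = []; for ks in groups.values(): ...
  let keep :=
    groups.values.foldl (fun keep ks =>
      let s := PySem.List.sorted ks (fun k => k)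
      -- pref = [k for k, nxt in zip(s, s[1:]) if nxt.startswith(k)]
      let pref := ((s.zip s.tail).filter (fun p => PySem.Str.startswith p.2 p.1)).map (fun p => p.1)
      -- shortest = min(ks, key=len); if shortest not in pref: pref.append(shortest); keep += pref
      match PySem.List.min? ks (fun k => PySem.Str.len k) with
      | some shortest => if pref.contains shortest then keep ++ pref else keep ++ (pref ++ [shortest])
      | none => keep ++ pref) []
  -- {k: xpath_dict[k] for k in sorted(keep)}
  (PySem.List.sorted keep (fun k => k)).map (fun k => (k, d.getD k ""))

-- ===== PRECONDITION & SPEC =====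
def Spec_simplify_xpath_dict (xpath_dict : List (String × String)) (out : List (String × String)) : Prop := out = simplify_xpath_dict_alt xpath_dict
instance (xpath_dict : List (String × String)) (out : List (String × String)) : Decidable (Spec_simplify_xpath_dict xpath_dict out) := by unfold Spec_simplify_xpath_dict; infer_instance

-- ===== CLAIM (what is proved, stated in full; the proofs are below) =====
def Claim_equal_simplify_xpath_dict : Prop := ∀ (xpath_dict : List (String × String)), Dom_simplify_xpath_dict xpath_dict → Spec_simplify_xpath_dict xpath_dict (simplify_xpath_dict xpath_dict)

-- ===== LEMMAS AND PROOFS =====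

-- the per-value key group, in insertion order
def pvGrp (items : List (String × String)) (v : String) : List String :=
  (items.filter (fun kv => kv.2 == v)).map (fun kv => kv.1)

-- "k has a proper extension among ks"
def pvExt (ks : List String) (k : String) : Prop :=
  ∃ k' ∈ ks, k' ≠ k ∧ PySem.Str.startswith k' k = true

-- what A adds for one group (the group's inner loop, collected)
def pvAddA (ks : List String) : List String :=
  let keys := PySem.List.sorted ks (fun k => PySem.Str.len k)
  ((PySem.List.enumerate keys 0).filter (fun ick =>
      ((PySem.List.slice keys (some (ick.1 + 1)) none).any
        (fun longer_key => PySem.Str.startswith longer_key ick.2)) || ick.1 == 0)).map (fun p => p.2)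

-- what B adds for one group
def pvAddB (ks : List String) : List String :=
  let s := PySem.List.sorted ks (fun k => k)
  let pref := ((s.zip s.tail).filter (fun p => PySem.Str.startswith p.2 p.1)).map (fun p => p.1)
  match PySem.List.min? ks (fun k => PySem.Str.len k) with
  | some shortest => if pref.contains shortest then pref else pref ++ [shortest]
  | none => pref

theorem pvMem_grp (items : List (String × String)) (v : String) (k : String) :
    k ∈ pvGrp items v ↔ (k, v) ∈ items := by
  unfold pvGrp
  constructor
  · intro h
    rcases List.mem_map.mp h with ⟨kv, hkv, rfl⟩
    rcases List.mem_filter.mp hkv with ⟨h1, h2⟩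
    have h3 : kv.2 = v := by simpa using h2
    cases kv
    simp only at h3
    subst h3
    exact h1
  · intro h
    exact List.mem_map.mpr ⟨(k, v), List.mem_filter.mpr ⟨h, by simp⟩, rfl⟩

theorem pvNodup_grp (items : List (String × String)) (hnd : (items.map (fun kv => kv.1)).Nodup)
    (v : String) : (pvGrp items v).Nodup :=
  List.Nodup.sublist (List.Sublist.map _ List.filter_sublist) hnd

theorem pvLex_append {t : List Char} (l : List Char) (hte : t ≠ []) :
    List.Lex (· < ·) l (l ++ t) := by
  induction l with
  | nil =>
    cases t with
    | nil => exact absurd rfl hte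
    | cons x xs => exact List.Lex.nil
  | cons x xs ih => exact List.Lex.cons ih

theorem pvPrefix_lt {a b : String} (h : a.toList <+: b.toList) (hne : a ≠ b) : a < b := by
  rcases h with ⟨t, ht⟩
  have hte : t ≠ [] := by
    intro h0
    subst h0
    exact hne (String.toList_inj.mp (by simpa using ht))
  rw [String.lt_iff_toList_lt]
  exact (List.lt_iff_lex_lt _ _).mpr (ht ▸ pvLex_append a.toList hte)

theorem pvLexBetween : ∀ (a b c : List Char), a <+: c → List.Lex (· < ·) a b →
    (List.Lex (· < ·) b c ∨ b = c) → a <+: b := by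
  intro a
  induction a with
  | nil => intro b c _ _ _; exact List.nil_prefix
  | cons x a' ih =>
    intro b c hac hab hbc
    rcases hac with ⟨t, ht⟩
    subst ht
    cases hab with
    | cons hab' =>
      rename_i l₂
      rcases hbc with hlex | heq
      · cases hlex with
        | cons h2 =>
          exact (List.cons_prefix_cons).mpr
            ⟨rfl, ih _ _ (List.prefix_append _ _) hab' (Or.inl h2)⟩
        | rel h2 => exact absurd h2 (lt_irrefl _)
      · have h3 : l₂ = a' ++ t := by
          have := heq
          rw [List.cons_append] at this
          exact (List.cons.injEq _ _ _ _).mp this |>.2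
        exact (List.cons_prefix_cons).mpr
          ⟨rfl, ih _ _ (List.prefix_append _ _) hab' (Or.inr h3)⟩
    | rel h1 =>
      rename_i y l₂
      rcases hbc with hlex | heq
      · cases hlex with
        | cons h2 => exact absurd h1 (lt_irrefl _)
        | rel h2 => exact absurd (h1.trans h2) (lt_irrefl _)
      · have h3 : y = x := by
          have := heq
          rw [List.cons_append] at this
          exact (List.cons.injEq _ _ _ _).mp this |>.1
        subst h3
        exact absurd h1 (lt_irrefl _)

theorem pvPrefix_between {a b c : String} (hac : a.toList <+: c.toList)
    (hab : a < b) (hbc : b < c ∨ b = c) : a.toList <+: b.toList := by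
  refine pvLexBetween a.toList b.toList c.toList hac ?_ ?_
  · rw [String.lt_iff_toList_lt] at hab
    exact (List.lt_iff_lex_lt _ _).mp hab
  · rcases hbc with h | h
    · left
      rw [String.lt_iff_toList_lt] at h
      exact (List.lt_iff_lex_lt _ _).mp h
    · right; rw [h]

theorem pvInsertBy_head? {α : Type} (bef : α → α → Bool) (x : α) (l : List α) :
    (PySem.List.insertBy bef x l).head? =
      some (match l.head? with | none => x | some h => if bef x h then x else h) := by
  cases l with
  | nil => simp [PySem.List.insertBy]
  | cons y ys =>
    simp only [PySem.List.insertBy, List.head?_cons]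
    split <;> simp

theorem pvFoldHead {α : Type} (bef : α → α → Bool) :
    ∀ (xs : List α) (acc : List α),
      (xs.foldl (fun a x => PySem.List.insertBy bef x a) acc).head? =
      xs.foldl (fun o x => match o with
        | none => some x
        | some m => if bef x m then some x else some m) acc.head? := by
  intro xs
  induction xs with
  | nil => intro acc; rfl
  | cons x xs ih =>
    intro acc
    simp only [List.foldl_cons]
    rw [ih]
    congr 1
    rw [pvInsertBy_head?]
    cases h : acc.head? with
    | none => rfl
    | some m => cases hb : bef x m <;> simp [hb]

theorem pvHead_sorted_eq_min? {α κ : Type} [LT κ] [DecidableLT κ] (xs : List α) (key : α → κ) :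
    (PySem.List.sorted xs key).head? = PySem.List.min? xs key := by
  rw [PySem.List.sorted_eq_foldl_insertBy, pvFoldHead]
  unfold PySem.List.min?
  have hfun : (fun (o : Option α) (x : α) => match o with
      | none => some x
      | some m => if (fun a b => decide (key a < key b)) x m = true then some x else some m)
      = (fun (o : Option α) (x : α) => match o with
      | none => some x
      | some m => if key x < key m then some x else some m) := by
    funext o x
    cases o with
    | none => rfl
    | some m => simp
  rw [hfun]
  rfl

theorem pvMapFstZip {α β : Type} : ∀ (l : List α) (l' : List β),
    (l.zip l').map Prod.fst = l.take l'.length := by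
  intro l
  induction l with
  | nil => intro l'; simp
  | cons x xs ih =>
    intro l'
    cases l' with
    | nil => simp
    | cons y ys => simp [ih]

theorem pvMem_addA (ks : List String) (hnd : ks.Nodup) (k : String) :
    k ∈ pvAddA ks ↔ k ∈ ks ∧ (pvExt ks k ∨ PySem.List.min? ks (fun k => PySem.Str.len k) = some k) := by
  have hndL : (PySem.List.sorted ks (fun k => PySem.Str.len k)).Nodup :=
    ((PySem.List.sorted_perm ks (fun k => PySem.Str.len k) false).nodup_iff).mpr hnd
  unfold pvAddA
  constructor
  · intro h
    rcases List.mem_map.mp h with ⟨p, hp, rfl⟩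
    rcases List.mem_filter.mp hp with ⟨hpe, hpc⟩
    rcases (PySem.List.mem_enumerate_iff _ _ _).mp hpe with ⟨i, hi, rfl⟩
    simp only
    refine ⟨(PySem.List.mem_sorted ks (fun k => PySem.Str.len k) false _).mp (List.getElem_mem hi), ?_⟩
    rcases Bool.or_eq_true_iff.mp hpc with ha | hz
    · left
      rw [PySem.List.slice_from _ (by omega : (0:Int) ≤ 0 + (i:Int) + 1)] at ha
      have hto : ((0:Int) + (i:Int) + 1).toNat = i + 1 := by omega
      rw [hto] at ha
      rcases List.any_eq_true.mp ha with ⟨lk, hlk, hsw⟩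
      rcases List.mem_drop_iff_getElem.mp hlk with ⟨j, hj, rfl⟩
      refine ⟨_, (PySem.List.mem_sorted ks (fun k => PySem.Str.len k) false _).mp (List.getElem_mem _), ?_, hsw⟩
      intro heq
      have := (hndL.getElem_inj_iff).mp heq
      omega
    · right
      have hi0 : i = 0 := by
        have : (0:Int) + (i:Int) = 0 := by simpa using hz
        omega
      subst hi0
      rw [← pvHead_sorted_eq_min?, List.head?_eq_getElem?, List.getElem?_eq_getElem hi]
  · rintro ⟨hk, hcase⟩
    have hkL : k ∈ PySem.List.sorted ks (fun k => PySem.Str.len k) :=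
      (PySem.List.mem_sorted ks (fun k => PySem.Str.len k) false _).mpr hk
    rcases hcase with ⟨k', hk', hne, hsw⟩ | hmin
    · rcases List.mem_iff_getElem.mp hkL with ⟨i, hi, hik⟩
      have hk'L : k' ∈ PySem.List.sorted ks (fun k => PySem.Str.len k) :=
        (PySem.List.mem_sorted ks (fun k => PySem.Str.len k) false _).mpr hk'
      rcases List.mem_iff_getElem.mp hk'L with ⟨j, hj, hjk⟩
      -- k is a proper prefix of k', hence strictly shorter
      have hpre : k.toList <+: k'.toList := by
        rw [PySem.Str.startswith_eq] at hsw
        exact (PySem.Chars.startswith_iff _ _).mp hsw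
      have hlenlt : k.toList.length < k'.toList.length := by
        rcases lt_or_eq_of_le hpre.length_le with h | h
        · exact h
        · exact absurd (String.toList_inj.mp (hpre.eq_of_length h)) (Ne.symm hne)
      have hkey : PySem.Str.len k < PySem.Str.len k' := by
        rw [PySem.Str.len_eq, PySem.Str.len_eq]
        exact_mod_cast hlenlt
      have hij : i < j := by
        rcases le_or_gt j i with hji | hij
        · exfalso
          have := PySem.List.key_sorted_getElem_mono ks (fun k => PySem.Str.len k) hji hi
          rw [hik, hjk] at this
          exact absurd (lt_of_lt_of_le hkey this) (lt_irrefl _)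
        · exact hij
      refine List.mem_map.mpr ⟨((0:Int) + (i:Int), k), List.mem_filter.mpr ⟨?_, ?_⟩, rfl⟩
      · exact (PySem.List.mem_enumerate_iff _ _ _).mpr ⟨i, hi, by rw [hik]⟩
      · apply Bool.or_eq_true_iff.mpr
        left
        rw [PySem.List.slice_from _ (by omega : (0:Int) ≤ 0 + (i:Int) + 1)]
        have hto : ((0:Int) + (i:Int) + 1).toNat = i + 1 := by omega
        rw [hto]
        apply List.any_eq_true.mpr
        refine ⟨k', ?_, hsw⟩
        apply List.mem_drop_iff_getElem.mpr
        refine ⟨j - i - 1, by omega, ?_⟩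
        have h5 : i + 1 + (j - i - 1) = j := by omega
        simp only [h5]
        exact hjk
    · -- min case: k is the head of the length-sorted list
      have hh : (PySem.List.sorted ks (fun k => PySem.Str.len k)).head? = some k := by
        rw [pvHead_sorted_eq_min?]; exact hmin
      have hlen0 : 0 < (PySem.List.sorted ks (fun k => PySem.Str.len k)).length :=
        List.length_pos_of_mem hkL
      have h0 : (PySem.List.sorted ks (fun k => PySem.Str.len k))[0] = k := by
        rw [List.head?_eq_getElem?, List.getElem?_eq_getElem hlen0] at hh
        exact Option.some_injective _ hh
      refine List.mem_map.mpr ⟨((0:Int) + (0:Int), k), List.mem_filter.mpr ⟨?_, ?_⟩, rfl⟩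
      · exact (PySem.List.mem_enumerate_iff _ _ _).mpr ⟨0, hlen0, by rw [h0]; rfl⟩
      · apply Bool.or_eq_true_iff.mpr
        right
        simp

theorem pvMem_addB (ks : List String) (hnd : ks.Nodup) (k : String) :
    k ∈ pvAddB ks ↔ k ∈ ks ∧ (pvExt ks k ∨ PySem.List.min? ks (fun k => PySem.Str.len k) = some k) := by
  have hndS : (PySem.List.sorted ks (fun k => k)).Nodup :=
    ((PySem.List.sorted_perm ks (fun k => k) false).nodup_iff).mpr hnd
  unfold pvAddB
  simp only
  have hpref : ∀ x : String,
      x ∈ (((PySem.List.sorted ks (fun k => k)).zip (PySem.List.sorted ks (fun k => k)).tail).filter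
            (fun p => PySem.Str.startswith p.2 p.1)).map (fun p => p.1)
        ↔ x ∈ ks ∧ pvExt ks x := by
    intro x
    constructor
    · intro h
      rcases List.mem_map.mp h with ⟨p, hp, rfl⟩
      rcases List.mem_filter.mp hp with ⟨hpz, hq⟩
      rcases List.mem_iff_getElem.mp hpz with ⟨i, hiz, rfl⟩
      have hi1 : i + 1 < (PySem.List.sorted ks (fun k => k)).length := by
        have h2 := hiz
        rw [List.length_zip, List.length_tail] at h2
        omega
      simp only [List.getElem_zip, List.getElem_tail] at hq ⊢
      refine ⟨(PySem.List.mem_sorted ks (fun k => k) false _).mp (List.getElem_mem _), ?_⟩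
      refine ⟨(PySem.List.sorted ks (fun k => k))[i + 1],
        (PySem.List.mem_sorted ks (fun k => k) false _).mp (List.getElem_mem _), ?_, hq⟩
      intro heq
      have := (hndS.getElem_inj_iff).mp heq
      omega
    · rintro ⟨hx, k', hk', hne, hsw⟩
      have hxS : x ∈ PySem.List.sorted ks (fun k => k) :=
        (PySem.List.mem_sorted ks (fun k => k) false _).mpr hx
      have hk'S : k' ∈ PySem.List.sorted ks (fun k => k) :=
        (PySem.List.mem_sorted ks (fun k => k) false _).mpr hk'
      rcases List.mem_iff_getElem.mp hxS with ⟨i, hi, hix⟩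
      rcases List.mem_iff_getElem.mp hk'S with ⟨j, hj, hjk⟩
      have hpre : x.toList <+: k'.toList := by
        rw [PySem.Str.startswith_eq] at hsw
        exact (PySem.Chars.startswith_iff _ _).mp hsw
      have hlt : x < k' := pvPrefix_lt hpre (Ne.symm hne)
      have hij : i < j := by
        rcases lt_trichotomy i j with h | h | h
        · exact h
        · exfalso
          subst h
          rw [hix] at hjk
          exact hne hjk.symm
        · exfalso
          have hmono := PySem.List.key_sorted_getElem_mono ks (fun k => k) (le_of_lt h) hi
          rw [hix, hjk] at hmono
          exact absurd (lt_of_lt_of_le hlt hmono) (lt_irrefl _)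
      have hi1 : i + 1 < (PySem.List.sorted ks (fun k => k)).length := by omega
      have hxm : x < (PySem.List.sorted ks (fun k => k))[i + 1] := by
        have hle := PySem.List.key_sorted_getElem_mono ks (fun k => k) (Nat.le_succ i) hi1
        rcases lt_or_eq_of_le hle with h | h
        · rw [hix] at h; exact h
        · exfalso
          have := (hndS.getElem_inj_iff).mp h
          omega
      have hmk' : (PySem.List.sorted ks (fun k => k))[i + 1] ≤ k' := by
        have hle := PySem.List.key_sorted_getElem_mono ks (fun k => k)
          (show i + 1 ≤ j by omega) hj
        rw [hjk] at hle
        exact hle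
      have hprem : x.toList <+: ((PySem.List.sorted ks (fun k => k))[i + 1]).toList := by
        rcases lt_or_eq_of_le hmk' with h | h
        · exact pvPrefix_between hpre hxm (Or.inl h)
        · rw [h]; exact hpre
      have hizlen : i < ((PySem.List.sorted ks (fun k => k)).zip
          (PySem.List.sorted ks (fun k => k)).tail).length := by
        rw [List.length_zip, List.length_tail]
        omega
      refine List.mem_map.mpr ⟨((PySem.List.sorted ks (fun k => k)).zip
          (PySem.List.sorted ks (fun k => k)).tail)[i], List.mem_filter.mpr ⟨List.getElem_mem _, ?_⟩, ?_⟩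
      · simp only [List.getElem_zip, List.getElem_tail]
        rw [PySem.Str.startswith_eq]
        apply (PySem.Chars.startswith_iff _ _).mpr
        rw [hix]
        exact hprem
      · simp only [List.getElem_zip]
        exact hix
  cases hmin : PySem.List.min? ks (fun k => PySem.Str.len k) with
  | none =>
    simp only
    rw [hpref k]
    have hks : ks = [] := (PySem.List.min?_eq_none_iff ks (fun k => PySem.Str.len k)).mp hmin
    subst hks
    simp [pvExt]
  | some m =>
    simp only
    have hm : m ∈ ks := PySem.List.min?_mem hmin
    by_cases hc : ((((PySem.List.sorted ks (fun k => k)).zip (PySem.List.sorted ks (fun k => k)).tail).filter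
            (fun p => PySem.Str.startswith p.2 p.1)).map (fun p => p.1)).contains m
    · rw [if_pos hc, hpref k]
      constructor
      · rintro ⟨h1, h2⟩; exact ⟨h1, Or.inl h2⟩
      · rintro ⟨h1, h2 | h2⟩
        · exact ⟨h1, h2⟩
        · have hkm : k = m := ((Option.some.injEq _ _).mp h2).symm
          subst hkm
          have hmp : k ∈ (((PySem.List.sorted ks (fun k => k)).zip
              (PySem.List.sorted ks (fun k => k)).tail).filter
              (fun p => PySem.Str.startswith p.2 p.1)).map (fun p => p.1) := by
            simpa using hc
          exact ((hpref k).mp hmp).2 |> fun hx => ⟨h1, hx⟩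
    · rw [if_neg hc]
      simp only [List.mem_append, List.mem_singleton]
      rw [hpref k]
      constructor
      · rintro (⟨h1, h2⟩ | rfl)
        · exact ⟨h1, Or.inl h2⟩
        · exact ⟨hm, Or.inr rfl⟩
      · rintro ⟨h1, h2 | h2⟩
        · exact Or.inl ⟨h1, h2⟩
        · right
          exact ((Option.some.injEq _ _).mp h2).symm

theorem pvNodup_addA (ks : List String) (hnd : ks.Nodup) : (pvAddA ks).Nodup := by
  have hndL : (PySem.List.sorted ks (fun k => PySem.Str.len k)).Nodup :=
    ((PySem.List.sorted_perm ks (fun k => PySem.Str.len k) false).nodup_iff).mpr hnd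
  unfold pvAddA
  have hsub := (List.filter_sublist (l := PySem.List.enumerate
      (PySem.List.sorted ks (fun k => PySem.Str.len k)) 0)
      (p := fun ick => ((PySem.List.slice (PySem.List.sorted ks (fun k => PySem.Str.len k))
        (some (ick.1 + 1)) none).any
        (fun longer_key => PySem.Str.startswith longer_key ick.2)) || ick.1 == 0)).map
      (fun p : ℤ × String => p.2)
  rw [PySem.List.map_snd_enumerate] at hsub
  exact List.Nodup.sublist hsub hndL

theorem pvNodup_addB (ks : List String) (hnd : ks.Nodup) : (pvAddB ks).Nodup := by
  have hndS : (PySem.List.sorted ks (fun k => k)).Nodup :=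
    ((PySem.List.sorted_perm ks (fun k => k) false).nodup_iff).mpr hnd
  unfold pvAddB
  simp only
  have hpn : ((((PySem.List.sorted ks (fun k => k)).zip (PySem.List.sorted ks (fun k => k)).tail).filter
      (fun p => PySem.Str.startswith p.2 p.1)).map (fun p => p.1)).Nodup := by
    have hsub := (List.filter_sublist (l := (PySem.List.sorted ks (fun k => k)).zip
        (PySem.List.sorted ks (fun k => k)).tail)
        (p := fun p => PySem.Str.startswith p.2 p.1)).map (fun p : String × String => p.1)
    rw [pvMapFstZip] at hsub
    exact List.Nodup.sublist (hsub.trans (List.take_sublist _ _)) hndS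
  cases hmin : PySem.List.min? ks (fun k => PySem.Str.len k) with
  | none => exact hpn
  | some m =>
    simp only
    by_cases hc : ((((PySem.List.sorted ks (fun k => k)).zip (PySem.List.sorted ks (fun k => k)).tail).filter
            (fun p => PySem.Str.startswith p.2 p.1)).map (fun p => p.1)).contains m
    · rw [if_pos hc]; exact hpn
    · rw [if_neg hc, ← List.concat_eq_append]
      refine (List.nodup_concat _ _).mpr ⟨?_, hpn⟩
      simpa using hc

theorem pvPerm_add (ks : List String) (hnd : ks.Nodup) : (pvAddA ks).Perm (pvAddB ks) := by
  rw [List.perm_ext_iff_of_nodup (pvNodup_addA ks hnd) (pvNodup_addB ks hnd)]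
  intro a
  rw [pvMem_addA ks hnd a, pvMem_addB ks hnd a]

theorem pvFoldMark (cond : ℤ × String → Bool) (e : List (ℤ × String)) (keep0 : PySem.Set String)
    (hnd : (e.map (fun p => p.2)).Nodup) (horig : ∀ p ∈ e, p.2 ∉ keep0) :
    e.foldl (fun keep ick =>
        if !(PySem.Set.contains keep ick.2) then
          (if cond ick then PySem.Set.add keep ick.2 else keep)
        else keep) keep0
      = keep0 ++ (e.filter cond).map (fun p => p.2) := by
  induction e generalizing keep0 with
  | nil => simp
  | cons p e ih =>
    have hp : p.2 ∉ keep0 := horig p List.mem_cons_self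
    have hc : PySem.Set.contains keep0 p.2 = false := by
      rw [← Bool.not_eq_true, PySem.Set.contains_iff]
      exact hp
    rw [List.map_cons, List.nodup_cons] at hnd
    obtain ⟨hp2, hnd'⟩ := hnd
    simp only [List.foldl_cons, hc, Bool.not_false, if_true]
    by_cases hcond : cond p = true
    · have hfresh : ∀ q ∈ e, q.2 ∉ keep0 ++ [p.2] := by
        intro q hq
        rw [List.mem_append]
        rintro (h | h)
        · exact horig q (List.mem_cons_of_mem _ hq) h
        · have hqp : q.2 = p.2 := by simpa using h
          apply hp2
          rw [← hqp]
          exact List.mem_map_of_mem hq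
      rw [if_pos hcond, PySem.Set.add_of_not_mem hp, ih (keep0 ++ [p.2]) hnd' hfresh,
        List.filter_cons_of_pos hcond, List.map_cons]
      simp
    · rw [if_neg hcond,
        ih keep0 hnd' (fun q hq => horig q (List.mem_cons_of_mem _ hq)),
        List.filter_cons_of_neg (by simpa using hcond)]

theorem pvInnerA (ks : List String) (keep0 : PySem.Set String) (hnd : ks.Nodup)
    (hf : ∀ k ∈ ks, k ∉ keep0) :
    (PySem.List.enumerate (PySem.List.sorted ks (fun k => PySem.Str.len k)) 0).foldl (fun keep ick =>
        if !(PySem.Set.contains keep ick.2) then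
          let is_prefix_of_others :=
            (PySem.List.slice (PySem.List.sorted ks (fun k => PySem.Str.len k)) (some (ick.1 + 1)) none).any
              (fun longer_key => PySem.Str.startswith longer_key ick.2)
          if is_prefix_of_others then PySem.Set.add keep ick.2
          else if ick.1 = 0 then PySem.Set.add keep ick.2
          else keep
        else keep) keep0 = keep0 ++ pvAddA ks := by
  have hb : (fun (keep : PySem.Set String) (ick : ℤ × String) =>
      if !(PySem.Set.contains keep ick.2) then
        let is_prefix_of_others :=
          (PySem.List.slice (PySem.List.sorted ks (fun k => PySem.Str.len k)) (some (ick.1 + 1)) none).any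
            (fun longer_key => PySem.Str.startswith longer_key ick.2)
        if is_prefix_of_others then PySem.Set.add keep ick.2
        else if ick.1 = 0 then PySem.Set.add keep ick.2
        else keep
      else keep)
      = (fun keep ick =>
      if !(PySem.Set.contains keep ick.2) then
        (if ((PySem.List.slice (PySem.List.sorted ks (fun k => PySem.Str.len k)) (some (ick.1 + 1)) none).any
            (fun longer_key => PySem.Str.startswith longer_key ick.2)) || ick.1 == 0 then
          PySem.Set.add keep ick.2
        else keep)
      else keep) := by
    funext keep ick
    rcases Bool.eq_false_or_eq_true (PySem.Set.contains keep ick.2) with hcn | hcn <;>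
      by_cases ha : ((PySem.List.slice (PySem.List.sorted ks (fun k => PySem.Str.len k)) (some (ick.1 + 1)) none).any
          (fun longer_key => PySem.Str.startswith longer_key ick.2)) = true <;>
      by_cases hz : ick.1 = 0 <;>
      simp [hcn, ha, hz]
  rw [hb]
  have hnd' : ((PySem.List.enumerate (PySem.List.sorted ks (fun k => PySem.Str.len k)) 0).map
      (fun p => p.2)).Nodup := by
    rw [PySem.List.map_snd_enumerate]
    exact ((PySem.List.sorted_perm ks (fun k => PySem.Str.len k) false).nodup_iff).mpr hnd
  have hf' : ∀ p ∈ PySem.List.enumerate (PySem.List.sorted ks (fun k => PySem.Str.len k)) 0,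
      p.2 ∉ keep0 := by
    intro p hp
    rcases (PySem.List.mem_enumerate_iff _ _ _).mp hp with ⟨i, hi, rfl⟩
    exact hf _ ((PySem.List.mem_sorted ks (fun k => PySem.Str.len k) false _).mp (List.getElem_mem hi))
  rw [pvFoldMark _ _ _ hnd' hf']
  rfl

theorem pvOuterA (grp : String → List String) (vs : List String) (keep0 : PySem.Set String)
    (hnds : ∀ v ∈ vs, (grp v).Nodup)
    (hpair : vs.Pairwise (fun v w => ∀ k, k ∈ grp v → k ∉ grp w))
    (hf : ∀ v ∈ vs, ∀ k ∈ grp v, k ∉ keep0) :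
    vs.foldl (fun keep v =>
      (PySem.List.enumerate (PySem.List.sorted (grp v) (fun k => PySem.Str.len k)) 0).foldl (fun keep ick =>
        if !(PySem.Set.contains keep ick.2) then
          let is_prefix_of_others :=
            (PySem.List.slice (PySem.List.sorted (grp v) (fun k => PySem.Str.len k)) (some (ick.1 + 1)) none).any
              (fun longer_key => PySem.Str.startswith longer_key ick.2)
          if is_prefix_of_others then PySem.Set.add keep ick.2
          else if ick.1 = 0 then PySem.Set.add keep ick.2
          else keep
        else keep) keep) keep0
    = keep0 ++ (vs.map (fun v => pvAddA (grp v))).flatten := by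
  induction vs generalizing keep0 with
  | nil => simp
  | cons v vs ih =>
    rw [List.foldl_cons]
    have hhead := pvInnerA (grp v) keep0 (hnds v List.mem_cons_self) (hf v List.mem_cons_self)
    rw [hhead]
    have hfresh : ∀ w ∈ vs, ∀ k ∈ grp w, k ∉ keep0 ++ pvAddA (grp v) := by
      intro w hw k hk
      rw [List.mem_append]
      rintro (h | h)
      · exact hf w (List.mem_cons_of_mem _ hw) k hk h
      · have hkv : k ∈ grp v :=
          ((pvMem_addA (grp v) (hnds v List.mem_cons_self) k).mp h).1
        exact (List.pairwise_cons.mp hpair).1 w hw k hkv hk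
    rw [ih (keep0 ++ pvAddA (grp v)) (fun w hw => hnds w (List.mem_cons_of_mem _ hw))
      (List.pairwise_cons.mp hpair).2 hfresh]
    simp

theorem pvBodyB (keep ks : List String) :
    (let s := PySem.List.sorted ks (fun k => k)
     let pref := ((s.zip s.tail).filter (fun p => PySem.Str.startswith p.2 p.1)).map (fun p => p.1)
     match PySem.List.min? ks (fun k => PySem.Str.len k) with
     | some shortest => if pref.contains shortest then keep ++ pref else keep ++ (pref ++ [shortest])
     | none => keep ++ pref)
    = keep ++ pvAddB ks := by
  unfold pvAddB
  simp only
  cases hmin : PySem.List.min? ks (fun k => PySem.Str.len k) with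
  | none => rfl
  | some m =>
    simp only
    split <;> rfl

theorem pvFlattenPerm {α β : Type} (f g : α → List β) (l : List α)
    (h : ∀ x ∈ l, (f x).Perm (g x)) :
    ((l.map f).flatten).Perm ((l.map g).flatten) := by
  induction l with
  | nil => simp
  | cons x xs ih =>
    simp only [List.map_cons, List.flatten_cons]
    exact (h x List.mem_cons_self).append (ih (fun y hy => h y (List.mem_cons_of_mem _ hy)))

theorem pvMain (d : PySem.Dict String String) (hkn : d.keys.Nodup) :
    ((PySem.List.sorted
        (((d.items.foldl (fun acc kv => acc.modify kv.2 [] (fun l => l ++ [kv.1])) PySem.Dict.empty).items).foldl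
          (fun keep vks =>
            (PySem.List.enumerate (PySem.List.sorted vks.2 (fun k => PySem.Str.len k)) 0).foldl (fun keep ick =>
              if !(PySem.Set.contains keep ick.2) then
                let is_prefix_of_others :=
                  (PySem.List.slice (PySem.List.sorted vks.2 (fun k => PySem.Str.len k)) (some (ick.1 + 1)) none).any
                    (fun longer_key => PySem.Str.startswith longer_key ick.2)
                if is_prefix_of_others then PySem.Set.add keep ick.2
                else if ick.1 = 0 then PySem.Set.add keep ick.2
                else keep
              else keep) keep) PySem.Set.empty)
        (fun k => k)).map (fun k => (k, d.getD k "")))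
    = ((PySem.List.sorted
        (((d.items.foldl (fun acc kv => acc.modify kv.2 [] (fun l => l ++ [kv.1])) PySem.Dict.empty).values).foldl
          (fun keep ks =>
            let s := PySem.List.sorted ks (fun k => k)
            let pref := ((s.zip s.tail).filter (fun p => PySem.Str.startswith p.2 p.1)).map (fun p => p.1)
            match PySem.List.min? ks (fun k => PySem.Str.len k) with
            | some shortest => if pref.contains shortest then keep ++ pref else keep ++ (pref ++ [shortest])
            | none => keep ++ pref) [])
        (fun k => k)).map (fun k => (k, d.getD k ""))) := by
  have hknd : (d.items.map (fun kv => kv.1)).Nodup := by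
    have h := hkn
    simp only [PySem.Dict.keys] at h
    exact h
  set G := d.items.foldl (fun acc kv => acc.modify kv.2 [] (fun l => l ++ [kv.1])) PySem.Dict.empty
    with hGdef
  set V := PySem.Set.ofList (d.items.map (fun kv => kv.2)) with hVdef
  have hGkeys : G.keys = V := by
    rw [hGdef, PySem.Dict.keys_foldl_modify_key d.items (fun kv => kv.2) []
      (fun acc kv => fun l => l ++ [kv.1]) PySem.Dict.empty, PySem.Dict.keys_empty,
      PySem.Set.update_nil_left, hVdef]
  have hGn : G.keys.Nodup := by rw [hGkeys, hVdef]; exact PySem.Set.nodup_ofList _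
  have hswap : G = ((d.items.map (fun kv => (kv.2, kv.1))).foldl
      (fun acc p => acc.modify p.1 [] (fun l => l ++ [p.2])) PySem.Dict.empty) := by
    rw [hGdef, List.foldl_map]
  have hGgetD : ∀ v, G.getD v [] = pvGrp d.items v := by
    intro v
    rw [hswap, PySem.Dict.getD_foldl_modify_append, PySem.Dict.getD_empty]
    unfold pvGrp
    simp only [List.nil_append, List.filter_map, List.map_map]
    rfl
  have hGitems : G.items = V.map (fun v => (v, pvGrp d.items v)) := by
    rw [PySem.Dict.items_eq_map_keys G hGn [], hGkeys]
    exact List.map_congr_left (fun v _ => by rw [hGgetD v])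
  have hGvalues : G.values = V.map (fun v => pvGrp d.items v) := by
    rw [PySem.Dict.values_eq_map_keys G hGn [], hGkeys]
    exact List.map_congr_left (fun v _ => by rw [hGgetD v])
  have hVnd : V.Nodup := by rw [hVdef]; exact PySem.Set.nodup_ofList _
  have hgnd : ∀ v, (pvGrp d.items v).Nodup := pvNodup_grp d.items hknd
  have huniq : ∀ v w k, k ∈ pvGrp d.items v → k ∈ pvGrp d.items w → v = w := by
    intro v w k h1 h2
    have h1' := (pvMem_grp d.items v k).mp h1
    have h2' := (pvMem_grp d.items w k).mp h2
    have e1 := PySem.Dict.get?_of_mem_items d h1' hkn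
    have e2 := PySem.Dict.get?_of_mem_items d h2' hkn
    rw [e1] at e2
    exact (Option.some.injEq _ _).mp e2
  have hdisj : V.Pairwise (fun v w => ∀ k, k ∈ pvGrp d.items v → k ∉ pvGrp d.items w) := by
    refine List.Pairwise.imp ?_ hVnd
    intro v w hne k hkv hkw
    exact hne (huniq v w k hkv hkw)
  have hAkeep : (G.items.foldl
          (fun keep vks =>
            (PySem.List.enumerate (PySem.List.sorted vks.2 (fun k => PySem.Str.len k)) 0).foldl (fun keep ick =>
              if !(PySem.Set.contains keep ick.2) then
                let is_prefix_of_others :=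
                  (PySem.List.slice (PySem.List.sorted vks.2 (fun k => PySem.Str.len k)) (some (ick.1 + 1)) none).any
                    (fun longer_key => PySem.Str.startswith longer_key ick.2)
                if is_prefix_of_others then PySem.Set.add keep ick.2
                else if ick.1 = 0 then PySem.Set.add keep ick.2
                else keep
              else keep) keep) PySem.Set.empty)
      = (V.map (fun v => pvAddA (pvGrp d.items v))).flatten := by
    rw [hGitems, List.foldl_map]
    exact (pvOuterA (fun v => pvGrp d.items v) V PySem.Set.empty (fun v _ => hgnd v) hdisj
      (fun _ _ _ _ => List.not_mem_nil)).trans (List.nil_append _)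
  have hBkeep : (G.values.foldl
          (fun keep ks =>
            let s := PySem.List.sorted ks (fun k => k)
            let pref := ((s.zip s.tail).filter (fun p => PySem.Str.startswith p.2 p.1)).map (fun p => p.1)
            match PySem.List.min? ks (fun k => PySem.Str.len k) with
            | some shortest => if pref.contains shortest then keep ++ pref else keep ++ (pref ++ [shortest])
            | none => keep ++ pref) [])
      = (V.map (fun v => pvAddB (pvGrp d.items v))).flatten := by
    have h3 : G.values.foldl
          (fun keep ks =>
            let s := PySem.List.sorted ks (fun k => k)
            let pref := ((s.zip s.tail).filter (fun p => PySem.Str.startswith p.2 p.1)).map (fun p => p.1)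
            match PySem.List.min? ks (fun k => PySem.Str.len k) with
            | some shortest => if pref.contains shortest then keep ++ pref else keep ++ (pref ++ [shortest])
            | none => keep ++ pref) []
        = V.foldl (fun keep v => keep ++ pvAddB (pvGrp d.items v)) [] := by
      rw [hGvalues, List.foldl_map]
      congr 1
      funext keep v
      exact pvBodyB keep (pvGrp d.items v)
    rw [h3, PySem.List.foldl_append_eq_flatMap, List.flatMap_def, List.nil_append]
  rw [hAkeep, hBkeep]
  have hperm : ((V.map (fun v => pvAddA (pvGrp d.items v))).flatten).Perm
      ((V.map (fun v => pvAddB (pvGrp d.items v))).flatten) :=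
    pvFlattenPerm _ _ V (fun v _ => pvPerm_add _ (hgnd v))
  rw [PySem.List.sorted_eq_sorted_of_perm _ _ (fun k => k) (fun a b h => h) hperm]

theorem simplify_xpath_dict_spec : Claim_equal_simplify_xpath_dict := by
  intro xpath_dict _
  unfold Spec_simplify_xpath_dict
  show simplify_xpath_dict xpath_dict = simplify_xpath_dict_alt xpath_dict
  unfold simplify_xpath_dict simplify_xpath_dict_alt
  exact pvMain (PySem.Dict.ofList xpath_dict) (PySem.Dict.nodup_keys_ofList xpath_dict)
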